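-- pv_equiv track=rewrite | github.com/aapaetsch/cmput-396-codes | A10/alice.py | generateTell
-- ===== SOURCE A (Python) =====
-- def generateTell(photons):
--     #Gets every third photon to ask bob.quantum_channel() to report
--     tell = []
--
--     for i in range(len(photons)):
--
--         if i%3 == 0:
--             tell.append(True)
--
--         else:
--             tell.append(False)
--
--     return tell
-- ===== SOURCE B (Python) =====
-- def generateTell(photons):
--     # Mark every third index True via strided slice assignment.
--     n = len(photons)
--     tell = [False] * n
--     tell[::3] = [True] * ((n + 2) // 3)
--     return tell
-- ===== Notes on version B (the rewrite author's own statement) =====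
-- stated objective: simpler
-- what changed: Replaces the per-index loop with a modulo branch by a bulk [False]*n fill plus one strided slice assignment of [True]*ceil(n/3).
import Mathlib
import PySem

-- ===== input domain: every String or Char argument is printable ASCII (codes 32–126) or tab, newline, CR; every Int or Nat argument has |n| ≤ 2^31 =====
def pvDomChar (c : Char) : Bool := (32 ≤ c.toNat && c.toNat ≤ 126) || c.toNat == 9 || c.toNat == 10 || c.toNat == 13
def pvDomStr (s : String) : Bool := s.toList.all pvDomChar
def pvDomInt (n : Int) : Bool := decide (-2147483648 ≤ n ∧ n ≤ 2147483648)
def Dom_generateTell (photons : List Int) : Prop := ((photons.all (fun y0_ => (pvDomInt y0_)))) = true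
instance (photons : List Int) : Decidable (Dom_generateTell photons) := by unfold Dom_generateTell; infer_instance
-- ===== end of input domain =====

-- B builds the result by a bulk False fill plus one strided slice assignment instead of a per-index modulo branch (objective: simpler).
-- ===== PORT A =====
-- tell = []; for i in range(len(photons)): tell.append(True if i%3==0 else False)
def generateTell (photons : List Int) : List Bool :=
  (PySem.List.pyRange 0 (photons.length : Int) 1).foldl
    (fun tell i => tell ++ [if PySem.Int.mod i 3 == 0 then true else false]) []

-- ===== PORT B =====
-- tell[::3] = vals : write vals into every third slot of xs (Python extended-slice assignment, step 3)
def sliceAssign3 (xs : List Bool) (vals : List Bool) : List Bool :=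
  match vals, xs with
  | [], xs => xs
  | _, [] => []
  | v :: vs, _ :: rest => v :: (rest.take 2 ++ sliceAssign3 (rest.drop 2) vs)

-- tell = [False]*n; tell[::3] = [True]*((n+2)//3)
def generateTell_alt (photons : List Int) : List Bool :=
  sliceAssign3 (List.replicate photons.length false)
               (List.replicate ((photons.length + 2) / 3) true)

-- ===== PRECONDITION & SPEC =====
def Spec_generateTell (photons : List Int) (out : List Bool) : Prop := out = generateTell_alt photons
instance (photons : List Int) (out : List Bool) : Decidable (Spec_generateTell photons out) := by unfold Spec_generateTell; infer_instance

-- ===== CLAIM (what is proved, stated in full; the proofs are below) =====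
def Claim_equal_generateTell : Prop := ∀ (photons : List Int), Dom_generateTell photons → Spec_generateTell photons (generateTell photons)

-- ===== LEMMAS AND PROOFS =====
lemma sa3_eq (n : Nat) :
    sliceAssign3 (List.replicate n false) (List.replicate ((n + 2) / 3) true)
      = (List.range n).map (fun k => decide (k % 3 = 0)) := by
  induction n using Nat.strong_induction_on with
  | _ n ih =>
    match n with
    | 0 => decide
    | 1 => decide
    | 2 => decide
    | (m+3) =>
      have h3 : (m + 3 + 2) / 3 = (m + 2) / 3 + 1 := by omega
      rw [h3]
      have hrep : List.replicate (m + 3) false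
          = false :: false :: false :: List.replicate m false := rfl
      have hstep : sliceAssign3 (false :: false :: false :: List.replicate m false)
            (true :: List.replicate ((m + 2) / 3) true)
          = true :: false :: false ::
              sliceAssign3 (List.replicate m false) (List.replicate ((m + 2) / 3) true) := rfl
      have hrep2 : List.replicate ((m + 2) / 3 + 1) true
          = true :: List.replicate ((m + 2) / 3) true := rfl
      rw [hrep, hrep2, hstep, ih m (by omega),
        show m + 3 = 3 + m by omega, List.range_add]
      simp [List.range_succ, Nat.add_mod_left, Function.comp]

lemma A_eq (photons : List Int) :
    generateTell photons
      = (List.range photons.length).map (fun k => decide (k % 3 = 0)) := by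
  unfold generateTell
  rw [PySem.List.foldl_append_singleton_eq_map, PySem.List.pyRange_one]
  simp only [List.nil_append, List.map_map, Int.sub_zero, Int.toNat_natCast]
  apply List.map_congr_left
  intro k hk
  simp
  omega

-- ===== VERDICT (by name: the statement is the Claim_ definition above) =====
theorem generateTell_spec : Claim_equal_generateTell := by
  intro photons _
  unfold Spec_generateTell generateTell_alt
  rw [A_eq, sa3_eq]
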